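-- pv_equiv track=rewrite | github.com/Eko-Refugium/DNAbyte | dnabyte/error_correction/errored_without_decoding.py | decimal_to_quaternary
-- ===== SOURCE A (Python) =====
-- def decimal_to_quaternary(decimal_number,q):
--     if decimal_number == 0:
--         return '0000'
--     quaternary = ''
--     for i in range(q//2):
--         quaternary = str(decimal_number % 4) + quaternary
--         decimal_number //= 4
--     return quaternary
-- ===== SOURCE B (Python) =====
-- def decimal_to_quaternary(decimal_number, q):
--     if decimal_number == 0:
--         return '0000'
--     digits = []
--     for i in range(q // 2 - 1, -1, -1):
--         digits.append(str((decimal_number >> (2 * i)) & 3))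
--     return ''.join(digits)
-- ===== Notes on version B (the rewrite author's own statement) =====
-- stated objective: faster
-- what changed: Instead of repeatedly floor-dividing decimal_number and prepending each digit to a growing string, B extracts each digit independently as (decimal_number >> 2*i) & 3 over descending positions, appends them to a list and joins once.
import Mathlib
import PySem

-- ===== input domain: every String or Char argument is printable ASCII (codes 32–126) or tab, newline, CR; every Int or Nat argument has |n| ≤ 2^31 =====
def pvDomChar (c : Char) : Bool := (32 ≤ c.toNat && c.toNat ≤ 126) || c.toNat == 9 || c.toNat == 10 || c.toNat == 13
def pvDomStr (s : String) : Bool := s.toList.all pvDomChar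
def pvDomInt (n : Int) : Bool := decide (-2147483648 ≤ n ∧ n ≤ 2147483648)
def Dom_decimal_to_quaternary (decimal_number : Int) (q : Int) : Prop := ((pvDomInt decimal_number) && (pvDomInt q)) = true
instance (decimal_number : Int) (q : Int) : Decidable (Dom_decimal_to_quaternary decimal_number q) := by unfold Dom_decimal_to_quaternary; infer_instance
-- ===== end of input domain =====

-- B replaces A's running divide-and-prepend accumulator by independent per-position digit
-- extraction via bit shifts, appending left-to-right and joining once.

-- ===== PORT A =====
-- strings are carried as List Char (PySem convention) and wrapped with String.mk at the end
def decimal_to_quaternary (decimal_number : Int) (q : Int) : String :=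
  if decimal_number = 0 then "0000"
  else
    -- quaternary = ''; for i in range(q//2): quaternary = str(n % 4) + quaternary; n //= 4
    let st := (PySem.List.pyRange 0 (PySem.Int.floordiv q 2) 1).foldl
      (fun (st : List Char × Int) _ =>
        (PySem.Int.toChars (PySem.Int.mod st.2 4) ++ st.1, PySem.Int.floordiv st.2 4))
      ([], decimal_number)
    String.mk st.1

-- ===== PORT B =====
def decimal_to_quaternary_alt (decimal_number : Int) (q : Int) : String :=
  if decimal_number = 0 then "0000"
  else
    -- digits = []; for i in range(q//2 - 1, -1, -1): digits.append(str((n >> (2*i)) & 3));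
    -- return ''.join(digits)
    -- every i this range yields is ≥ 0, so Python's 'n >> 2*i' is 'n >>> (2*i).toNat' exactly
    String.mk (((PySem.List.pyRange (PySem.Int.floordiv q 2 - 1) (-1) (-1)).foldl
      (fun (ds : List (List Char)) i =>
        ds ++ [PySem.Int.toChars
          (PySem.Int.band (decimal_number >>> (2 * i).toNat) 3)])
      []).flatten)

-- ===== PRECONDITION & SPEC =====
def Spec_decimal_to_quaternary (decimal_number : Int) (q : Int) (out : String) : Prop := out = decimal_to_quaternary_alt decimal_number q
instance (decimal_number : Int) (q : Int) (out : String) : Decidable (Spec_decimal_to_quaternary decimal_number q out) := by unfold Spec_decimal_to_quaternary; infer_instance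

-- ===== CLAIM (what is proved, stated in full; the proofs are below) =====
def Claim_equal_decimal_to_quaternary : Prop := ∀ (decimal_number : Int) (q : Int), Dom_decimal_to_quaternary decimal_number q → Spec_decimal_to_quaternary decimal_number q (decimal_to_quaternary decimal_number q)

-- ===== LEMMAS AND PROOFS =====

-- the fixed-width digit block d_{k-1} … d_1 d_0 of n, where d_i = (n // 4^i) % 4
def pvDigits (n : Int) : Nat → List Char
  | 0 => []
  | k+1 => PySem.Int.toChars (PySem.Int.mod (PySem.Int.floordiv n ((4 : Int) ^ k)) 4)
             ++ pvDigits n k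

theorem pvFloordiv_floordiv (a : Int) (k : Nat) :
    PySem.Int.floordiv (PySem.Int.floordiv a 4) ((4 : Int) ^ k)
      = PySem.Int.floordiv a ((4 : Int) ^ (k + 1)) := by
  rw [PySem.Int.floordiv_eq_ediv_of_pos (by norm_num),
      PySem.Int.floordiv_eq_ediv_of_pos (by positivity),
      PySem.Int.floordiv_eq_ediv_of_pos (by positivity),
      Int.ediv_ediv_of_nonneg (by norm_num), pow_succ']

theorem pvDigits_shift (n : Int) (k : Nat) :
    pvDigits n (k + 1)
      = pvDigits (PySem.Int.floordiv n 4) k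
          ++ PySem.Int.toChars (PySem.Int.mod n 4) := by
  induction k with
  | zero => simp [pvDigits]
  | succ k ih =>
    show PySem.Int.toChars (PySem.Int.mod (PySem.Int.floordiv n ((4:Int) ^ (k+1))) 4)
          ++ pvDigits n (k+1) = _
    rw [ih, pvDigits, pvFloordiv_floordiv, List.append_assoc]

theorem pvFoldA (l : List Int) (n : Int) (s : List Char) :
    ((l.foldl
      (fun (st : List Char × Int) _ =>
        (PySem.Int.toChars (PySem.Int.mod st.2 4) ++ st.1, PySem.Int.floordiv st.2 4))
      (s, n)).1) = pvDigits n l.length ++ s := by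
  induction l generalizing n s with
  | nil => simp [pvDigits]
  | cons x xs ih =>
    simp only [List.foldl_cons, List.length_cons, ih, pvDigits_shift, List.append_assoc]

-- (decimal_number >> 2k) & 3 is the k-th base-4 digit, i.e. (decimal_number // 4^k) % 4
theorem pvBand3 (a : Int) : PySem.Int.band a 3 = PySem.Int.mod a 4 := by
  unfold PySem.Int.band
  rw [PySem.Int.mod_eq_emod_of_pos (by norm_num)]
  by_cases h : 0 ≤ a
  · simp only [h, if_true, show (0:Int) ≤ 3 by norm_num]
    have h1 : a.toNat &&& Int.toNat 3 = a.toNat % 4 := Nat.and_two_pow_sub_one_eq_mod a.toNat 2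
    rw [h1]
    have h2 : ((a.toNat % 4 : Nat) : Int) = a % 4 := by omega
    simpa using h2
  · simp only [h, if_false, show (0:Int) ≤ 3 by norm_num, if_true]
    have h1 : Int.toNat 3 &&& (-a - 1).toNat = (-a - 1).toNat % 4 := by
      rw [Nat.and_comm]
      exact Nat.and_two_pow_sub_one_eq_mod (-a - 1).toNat 2
    rw [h1]
    omega

theorem pvShiftBand (dn : Int) (k : Nat) :
    PySem.Int.band (dn >>> (2 * k)) 3
      = PySem.Int.mod (PySem.Int.floordiv dn ((4 : Int) ^ k)) 4 := by
  rw [pvBand3, Int.shiftRight_eq_div_pow,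
      PySem.Int.floordiv_eq_ediv_of_pos (by positivity), pow_mul]
  norm_num

theorem pvFoldB (dn : Int) (k : Nat) (ds : List (List Char)) :
    ((PySem.List.pyRange ((k : Int) - 1) (-1) (-1)).foldl
      (fun (ds : List (List Char)) i =>
        ds ++ [PySem.Int.toChars
          (PySem.Int.band (dn >>> (2 * i).toNat) 3)])
      ds).flatten = ds.flatten ++ pvDigits dn k := by
  induction k generalizing ds with
  | zero =>
    rw [show ((0:Nat):Int) - 1 = -1 by norm_num,
        PySem.List.pyRange_neg_one_eq_nil le_rfl]
    simp [pvDigits]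
  | succ k ih =>
    rw [show (((k+1 : Nat)):Int) - 1 = (k : Int) by push_cast; ring,
        PySem.List.pyRange_neg_one_cons (by omega : (-1:Int) < (k:Int)),
        List.foldl_cons, ih,
        show (2 * (k : Int)).toNat = 2 * k by omega,
        Int.shiftRight_natCast_right, pvShiftBand]
    simp [pvDigits]

-- ===== VERDICT (by name: the statement is the Claim_ definition above) =====
theorem decimal_to_quaternary_spec : Claim_equal_decimal_to_quaternary := by
  intro n q _
  unfold Spec_decimal_to_quaternary decimal_to_quaternary decimal_to_quaternary_alt
  by_cases h0 : n = 0
  · simp [h0]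
  · simp only [h0, if_false]
    set m := PySem.Int.floordiv q 2 with hm
    by_cases hm0 : m ≤ 0
    · rw [PySem.List.pyRange_one_eq_nil hm0,
          PySem.List.pyRange_neg_one_eq_nil (by omega : m - 1 ≤ -1)]
      rfl
    · rw [pvFoldA, PySem.List.length_pyRange_one,
          show m - 0 = m from sub_zero m,
          show m - 1 = ((m.toNat : Nat) : Int) - 1 by omega,
          pvFoldB]
      simp
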